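-- pv_equiv track=rewrite | github.com/BioDecodingLab/DenseTissueAnalysis | Quantification_codes/python/02_Group and compute stats v4_only_nuclei.py | ordenar_modelos_por_sufijo
-- ===== SOURCE A (Python) =====
-- def ordenar_modelos_por_sufijo(lista_modelos):
--     sufijos_orden = [
--         'Microscopy', 'raw', 'CycleGAN', 'SNR_1', 'SNR_5', 'SNR_15', 'GT', 'iso2D',
--         'RL10', 'RLF10', 'RedLionFish10', 'CARE', 'SelfNet0', 'SelfNetRL'
--     ]
--     def extraer_sufijo(nombre):
--         partes = nombre.split('_')
--         return partes[-1] if len(partes) > 1 else nombre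
--     def clave_orden(nombre):
--         for i, s in enumerate(sufijos_orden):
--             if nombre.endswith(s):
--                 return (i, nombre)
--         return (len(sufijos_orden), nombre)
--     return sorted(lista_modelos, key=clave_orden)
-- ===== SOURCE B (Python) =====
-- def ordenar_modelos_por_sufijo(lista_modelos):
--     sufijos_orden = [
--         'Microscopy', 'raw', 'CycleGAN', 'SNR_1', 'SNR_5', 'SNR_15', 'GT', 'iso2D',
--         'RL10', 'RLF10', 'RedLionFish10', 'CARE', 'SelfNet0', 'SelfNetRL'
--     ]
--     k = len(sufijos_orden)
--
--     def prioridad(nombre):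
--         # first matching suffix = minimum matching index (indices are increasing)
--         return min((j for j, s in enumerate(sufijos_orden) if nombre.endswith(s)), default=k)
--
--     cubetas = [[] for _ in range(k + 1)]
--     for nombre in lista_modelos:
--         cubetas[prioridad(nombre)].append(nombre)
--     return [nombre for cubeta in cubetas for nombre in sorted(cubeta)]
-- ===== Notes on version B (the rewrite author's own statement) =====
-- stated objective: alternative
-- what changed: Replaces the single keyed sorted() call with a bucket distribution: the priority class of each name is computed once as the minimum matching-suffix index, names are appended to one of k+1 buckets in a single pass, and each bucket is plain-sorted by name and concatenated in priority order.
import Mathlib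
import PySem

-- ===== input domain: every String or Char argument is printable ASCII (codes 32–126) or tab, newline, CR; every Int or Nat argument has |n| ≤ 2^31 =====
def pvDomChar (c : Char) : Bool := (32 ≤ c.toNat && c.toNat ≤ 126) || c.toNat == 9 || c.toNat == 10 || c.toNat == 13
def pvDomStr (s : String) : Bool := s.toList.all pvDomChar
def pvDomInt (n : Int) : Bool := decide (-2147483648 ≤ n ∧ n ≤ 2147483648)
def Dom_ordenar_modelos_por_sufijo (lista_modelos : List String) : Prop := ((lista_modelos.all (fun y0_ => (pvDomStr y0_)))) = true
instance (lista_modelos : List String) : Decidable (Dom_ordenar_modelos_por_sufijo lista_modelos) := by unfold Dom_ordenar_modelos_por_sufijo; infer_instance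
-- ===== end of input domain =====

-- B replaces A's single keyed sorted() with a bucket decomposition (priority computed as the
-- minimum matching-suffix index via a comprehension; each priority class plain-sorted and the
-- classes concatenated in order); objective: alternative.


-- the suffix table (the same string literal appears in both Pythons; shared here as data)
def pvSufijos : List String :=
  ["Microscopy", "raw", "CycleGAN", "SNR_1", "SNR_5", "SNR_15", "GT", "iso2D",
   "RL10", "RLF10", "RedLionFish10", "CARE", "SelfNet0", "SelfNetRL"]

-- ===== PORT A =====
-- the 'for i, s in enumerate(sufijos_orden): if nombre.endswith(s): return (i, nombre)' scan;
-- the counter i starts at 0, so at the end of the list it equals len(sufijos_orden) (the fallback)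
def pvClaveGo (nombre : String) : Nat → List String → Nat
  | i, [] => i
  | i, s :: rest => if PySem.Str.endswith nombre s then i else pvClaveGo nombre (i + 1) rest

def pvClaveOrden (nombre : String) : Nat × String := (pvClaveGo nombre 0 pvSufijos, nombre)

def ordenar_modelos_por_sufijo (lista_modelos : List String) : List String :=
  PySem.List.sorted2 lista_modelos (fun n => (pvClaveOrden n).1) (fun n => (pvClaveOrden n).2) false

-- ===== PORT B =====
-- min((j for j, s in enumerate(sufijos_orden) if nombre.endswith(s)), default=k)
def pvPrioB (nombre : String) : Nat :=
  ((pvSufijos.zipIdx.filter (fun p => PySem.Str.endswith nombre p.1)).map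
    (fun p => p.2)).min?.getD pvSufijos.length

-- the distribution pass: cubetas[prioridad(nombre)].append(nombre) over k+1 empty buckets
def pvDistribuir (lista_modelos : List String) : List (List String) :=
  lista_modelos.foldl (fun cubetas n => cubetas.modify (pvPrioB n) (fun c => c ++ [n]))
    (List.replicate (pvSufijos.length + 1) [])

-- the final comprehension: each bucket plain-sorted, concatenated in bucket order
def ordenar_modelos_por_sufijo_alt (lista_modelos : List String) : List String :=
  (pvDistribuir lista_modelos).flatMap (fun c => PySem.List.sorted c (fun x => x) false)

-- ===== PRECONDITION & SPEC =====
def Spec_ordenar_modelos_por_sufijo (lista_modelos : List String) (out : List String) : Prop := out = ordenar_modelos_por_sufijo_alt lista_modelos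
instance (lista_modelos : List String) (out : List String) : Decidable (Spec_ordenar_modelos_por_sufijo lista_modelos out) := by unfold Spec_ordenar_modelos_por_sufijo; infer_instance

-- ===== CLAIM (what is proved, stated in full; the proofs are below) =====
def Claim_equal_ordenar_modelos_por_sufijo : Prop := ∀ (lista_modelos : List String), Dom_ordenar_modelos_por_sufijo lista_modelos → Spec_ordenar_modelos_por_sufijo lista_modelos (ordenar_modelos_por_sufijo lista_modelos)

-- ===== LEMMAS AND PROOFS =====

-- indices produced by zipIdx j are at least j
theorem pv_zipIdx_snd_ge (q : String × Nat → Bool) (ss : List String) (j : Nat) :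
    ∀ m ∈ ((ss.zipIdx j).filter q).map (fun p => p.2), j ≤ m := by
  intro m hm
  rcases List.mem_map.mp hm with ⟨p, hp, rfl⟩
  exact (List.mem_zipIdx (List.mem_filter.mp hp).1).1

-- A's first-match scan equals B's minimum-of-matches computation
theorem pvClaveGo_eq_min (n : String) : ∀ (ss : List String) (i : Nat),
    pvClaveGo n i ss =
      (((ss.zipIdx i).filter (fun p => PySem.Str.endswith n p.1)).map
        (fun p => p.2)).min?.getD (i + ss.length) := by
  intro ss
  induction ss with
  | nil => intro i; simp [pvClaveGo]
  | cons s rest ih =>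
      intro i
      rw [List.zipIdx_cons]
      simp only [pvClaveGo, List.filter_cons]
      by_cases hb : PySem.Str.endswith n s
      · simp only [hb, if_true, List.map_cons, List.min?_cons]
        cases hmin : ((rest.zipIdx (i + 1)).filter (fun p => PySem.Str.endswith n p.1)).map
            (fun p => p.2) |>.min? with
        | none => simp
        | some m =>
            have hm : i + 1 ≤ m :=
              pv_zipIdx_snd_ge _ rest (i + 1) m (List.min?_mem hmin)
            simp only [Option.elim_some, Option.getD_some]
            omega
      · simp only [hb, if_false, Bool.false_eq_true]
        rw [ih (i + 1)]
        congr 1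
        simp [List.length_cons]
        omega

theorem pvClave_fst (n : String) : (pvClaveOrden n).1 = pvPrioB n := by
  simp only [pvClaveOrden, pvPrioB]
  rw [pvClaveGo_eq_min]
  rfl

theorem pvClave_snd (n : String) : (pvClaveOrden n).2 = n := rfl

-- The total preorder both programs sort by: priority class first, then the name itself.
def pvR (a b : String) : Prop := pvPrioB a < pvPrioB b ∨ (pvPrioB a = pvPrioB b ∧ a ≤ b)

-- A's comparison function (sorted2's 'lt' for reverse = false), written out
def pvBefore (a b : String) : Bool :=
  decide ((pvClaveOrden a).1 < (pvClaveOrden b).1) ||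
    (!decide ((pvClaveOrden b).1 < (pvClaveOrden a).1) && decide ((pvClaveOrden a).2 < (pvClaveOrden b).2))

theorem pvA_eq_foldl (l : List String) :
    ordenar_modelos_por_sufijo l = l.foldl (fun acc x => PySem.List.insertBy pvBefore x acc) [] := rfl

theorem pvBefore_true {a b : String} (h : pvBefore a b = true) : pvR a b := by
  simp only [pvBefore, pvClave_fst, pvClave_snd, Bool.or_eq_true, Bool.and_eq_true,
    Bool.not_eq_true', decide_eq_true_iff, decide_eq_false_iff_not] at h
  rcases h with h | ⟨h1, h2⟩
  · exact Or.inl h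
  · by_cases hlt : pvPrioB a < pvPrioB b
    · exact Or.inl hlt
    · exact Or.inr ⟨Nat.le_antisymm (Nat.le_of_not_lt h1) (Nat.le_of_not_lt hlt), le_of_lt h2⟩

theorem pvBefore_false {a b : String} (h : pvBefore a b = false) : pvR b a := by
  simp only [pvBefore, pvClave_fst, pvClave_snd, Bool.or_eq_false_iff, Bool.and_eq_false_iff,
    Bool.not_eq_false', decide_eq_true_iff, decide_eq_false_iff_not] at h
  obtain ⟨h1, h2⟩ := h
  rcases h2 with h2 | h2
  · exact Or.inl h2
  · by_cases hlt : pvPrioB b < pvPrioB a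
    · exact Or.inl hlt
    · exact Or.inr ⟨Nat.le_antisymm (Nat.le_of_not_lt h1) (Nat.le_of_not_lt hlt), not_lt.mp h2⟩

theorem pvR_trans {a b c : String} (hab : pvR a b) (hbc : pvR b c) : pvR a c := by
  rcases hab with h1 | ⟨h1, h1'⟩ <;> rcases hbc with h2 | ⟨h2, h2'⟩
  · exact Or.inl (Nat.lt_trans h1 h2)
  · exact Or.inl (h2 ▸ h1)
  · exact Or.inl (h1 ▸ h2)
  · exact Or.inr ⟨h1.trans h2, le_trans h1' h2'⟩

theorem pv_insertBy_pairwise (x : String) : ∀ (ys : List String), ys.Pairwise pvR →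
    (PySem.List.insertBy pvBefore x ys).Pairwise pvR := by
  intro ys
  induction ys with
  | nil => intro _; simp [PySem.List.insertBy]
  | cons y ys ih =>
      intro hp
      rw [List.pairwise_cons] at hp
      obtain ⟨hy, hys⟩ := hp
      simp only [PySem.List.insertBy]
      by_cases hb : pvBefore x y = true
      · simp only [hb, if_true]
        refine List.Pairwise.cons ?_ (List.Pairwise.cons hy hys)
        intro z hz
        rcases List.mem_cons.mp hz with rfl | hz
        · exact pvBefore_true hb
        · exact pvR_trans (pvBefore_true hb) (hy z hz)
      · rw [Bool.not_eq_true] at hb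
        simp only [hb, Bool.false_eq_true, if_false]
        refine List.Pairwise.cons ?_ (ih hys)
        intro z hz
        rcases (PySem.List.mem_insertBy pvBefore x z ys).mp hz with rfl | hz
        · exact pvBefore_false hb
        · exact hy z hz

theorem pvA_pairwise (l : List String) : (ordenar_modelos_por_sufijo l).Pairwise pvR := by
  rw [pvA_eq_foldl]
  have : ∀ (l : List String) (acc : List String), acc.Pairwise pvR →
      (l.foldl (fun acc x => PySem.List.insertBy pvBefore x acc) acc).Pairwise pvR := by
    intro l
    induction l with
    | nil => intro acc h; exact h
    | cons x xs ih => intro acc h; exact ih _ (pv_insertBy_pairwise x acc h)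
  exact this l [] List.Pairwise.nil

theorem pvA_perm (l : List String) : (ordenar_modelos_por_sufijo l).Perm l :=
  PySem.List.sorted2_perm l _ _ false

-- ----- B side -----

theorem pv_distribuir_go (i : Nat) : ∀ (l : List String) (bs : List (List String)),
    (l.foldl (fun cubetas n => cubetas.modify (pvPrioB n) (fun c => c ++ [n])) bs)[i]? =
      (bs[i]?.map (fun c => c ++ l.filter (fun n => pvPrioB n == i))) := by
  intro l
  induction l with
  | nil =>
      intro bs
      simp [List.filter_nil]
  | cons n l ih =>
      intro bs
      rw [List.foldl_cons, ih]
      rw [List.getElem?_modify]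
      cases hbs : bs[i]? with
      | none => simp
      | some c =>
          simp only [Option.map_some, Option.map_eq_map, List.filter_cons]
          by_cases h : pvPrioB n = i
          · simp [h]
          · have : (pvPrioB n == i) = false := by simpa using h
            simp [h, this]

theorem pvDistribuir_eq (l : List String) :
    pvDistribuir l = (List.range 15).map (fun i => l.filter (fun n => pvPrioB n == i)) := by
  apply List.ext_getElem?
  intro i
  rw [pvDistribuir, pv_distribuir_go, List.getElem?_map]
  by_cases hi : i < 15
  · rw [List.getElem?_range hi]
    have : (List.replicate (pvSufijos.length + 1) ([] : List String))[i]? = some [] := by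
      apply List.getElem?_replicate_of_lt
      simpa [pvSufijos] using hi
    rw [this]
    simp
  · have h1 : (List.replicate (pvSufijos.length + 1) ([] : List String))[i]? = none := by
      apply List.getElem?_eq_none
      simp [pvSufijos]
      omega
    have h2 : (List.range 15)[i]? = none := by
      apply List.getElem?_eq_none
      simp
      omega
    rw [h1, h2]
    simp

theorem pvB_eq_flatMap (l : List String) :
    ordenar_modelos_por_sufijo_alt l =
      (List.range 15).flatMap
        (fun i => PySem.List.sorted (l.filter (fun n => pvPrioB n == i)) (fun x => x) false) := by
  rw [ordenar_modelos_por_sufijo_alt, pvDistribuir_eq, List.flatMap_map]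

theorem pvPrioB_lt (n : String) : pvPrioB n < 15 := by
  simp only [pvPrioB]
  cases hmin : ((pvSufijos.zipIdx.filter (fun p => PySem.Str.endswith n p.1)).map
      (fun p => p.2)).min? with
  | none => simp [pvSufijos]
  | some m =>
      rcases List.mem_map.mp (List.min?_mem hmin) with ⟨p, hp, rfl⟩
      have := (List.mem_zipIdx (List.mem_filter.mp hp).1).2.1
      simp only [Option.getD_some]
      revert this
      simp [pvSufijos]
      omega

theorem pv_flatMap_perm_congr {g h : Nat → List String} : ∀ (js : List Nat),
    (∀ i ∈ js, (g i).Perm (h i)) → (js.flatMap g).Perm (js.flatMap h) := by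
  intro js
  induction js with
  | nil => intro _; rfl
  | cons j js ih =>
      intro hg
      simp only [List.flatMap_cons]
      exact (hg j (List.mem_cons_self)).append (ih (fun i hi => hg i (List.mem_cons_of_mem _ hi)))

theorem pv_buckets_perm_aux : ∀ (m : Nat) (l : List String),
    ((List.range m).flatMap (fun i => l.filter (fun x => pvPrioB x == i)) ++
      l.filter (fun x => decide (m ≤ pvPrioB x))).Perm l := by
  intro m
  induction m with
  | zero =>
      intro l
      simp [List.range_zero]
  | succ m ih =>
      intro l
      rw [List.range_succ, List.flatMap_append]
      simp only [List.flatMap_cons, List.flatMap_nil, List.append_nil]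
      have hsplit :
          (l.filter (fun x => pvPrioB x == m) ++
            l.filter (fun x => decide (m + 1 ≤ pvPrioB x))).Perm
            (l.filter (fun x => decide (m ≤ pvPrioB x))) := by
        have hperm := List.filter_append_perm (fun x => pvPrioB x == m)
          (l.filter (fun x => decide (m ≤ pvPrioB x)))
        rw [List.filter_filter, List.filter_filter] at hperm
        have e1 : l.filter (fun a => (pvPrioB a == m) && decide (m ≤ pvPrioB a)) =
            l.filter (fun x => pvPrioB x == m) := by
          apply List.filter_congr
          intro x _
          cases hmb : (pvPrioB x == m) with
          | true =>
              have hx : pvPrioB x = m := by simpa using hmb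
              simp [hx]
          | false => simp
        have e2 : l.filter (fun a => (!(pvPrioB a == m)) && decide (m ≤ pvPrioB a)) =
            l.filter (fun x => decide (m + 1 ≤ pvPrioB x)) := by
          apply List.filter_congr
          intro x _
          cases hmb : (pvPrioB x == m) with
          | true =>
              have hx : pvPrioB x = m := by simpa using hmb
              simp only [Bool.not_true, Bool.false_and]
              rw [hx]
              exact (decide_eq_false (by omega)).symm
          | false =>
              have hx : pvPrioB x ≠ m := by simpa using hmb
              simp only [Bool.not_false, Bool.true_and]
              exact decide_eq_decide.mpr (by omega)
        rw [e1, e2] at hperm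
        exact hperm
      rw [List.append_assoc]
      exact List.Perm.trans (List.Perm.append_left _ hsplit) (ih l)

theorem pvB_perm (l : List String) : (ordenar_modelos_por_sufijo_alt l).Perm l := by
  rw [pvB_eq_flatMap]
  have h1 : ((List.range 15).flatMap
      (fun i => PySem.List.sorted (l.filter (fun x => pvPrioB x == i)) (fun x => x) false)).Perm
      ((List.range 15).flatMap (fun i => l.filter (fun x => pvPrioB x == i))) :=
    pv_flatMap_perm_congr _ (fun i _ => PySem.List.sorted_perm _ _ false)
  have h2 := pv_buckets_perm_aux 15 l
  have h3 : l.filter (fun x => decide (15 ≤ pvPrioB x)) = [] := by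
    apply List.filter_eq_nil_iff.mpr
    intro x _
    have := pvPrioB_lt x
    simp; omega
  rw [h3, List.append_nil] at h2
  exact h1.trans h2

theorem pv_pw_flatMap (g : Nat → List String) : ∀ (js : List Nat), js.Pairwise (· < ·) →
    (∀ i ∈ js, (g i).Pairwise pvR ∧ ∀ x ∈ g i, pvPrioB x = i) →
    (js.flatMap g).Pairwise pvR := by
  intro js
  induction js with
  | nil => intro _ _; simp
  | cons j js ih =>
      intro hjs hg
      rw [List.pairwise_cons] at hjs
      obtain ⟨hj, hjs⟩ := hjs
      simp only [List.flatMap_cons]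
      rw [List.pairwise_append]
      refine ⟨(hg j List.mem_cons_self).1, ih hjs (fun i hi => hg i (List.mem_cons_of_mem _ hi)), ?_⟩
      intro a ha b hb
      rcases List.mem_flatMap.mp hb with ⟨i, hi, hbi⟩
      left
      rw [(hg j List.mem_cons_self).2 a ha,
        (hg i (List.mem_cons_of_mem _ hi)).2 b hbi]
      exact hj i hi

theorem pvB_pairwise (l : List String) : (ordenar_modelos_por_sufijo_alt l).Pairwise pvR := by
  rw [pvB_eq_flatMap]
  apply pv_pw_flatMap _ _ List.pairwise_lt_range
  intro i _
  constructor
  · have hpw := PySem.List.sorted_pairwise (l.filter (fun x => pvPrioB x == i)) (fun x => x)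
    refine hpw.imp_of_mem ?_
    intro a b ha hb hab
    have ha' : pvPrioB a = i := by
      have := List.mem_filter.mp ((PySem.List.mem_sorted _ _ _ a).mp ha)
      simpa using this.2
    have hb' : pvPrioB b = i := by
      have := List.mem_filter.mp ((PySem.List.mem_sorted _ _ _ b).mp hb)
      simpa using this.2
    exact Or.inr ⟨ha'.trans hb'.symm, hab⟩
  · intro x hx
    have := List.mem_filter.mp ((PySem.List.mem_sorted _ _ _ x).mp hx)
    simpa using this.2

-- ===== VERDICT (by name: the statement is the Claim_ definition above) =====
theorem ordenar_modelos_por_sufijo_spec : Claim_equal_ordenar_modelos_por_sufijo := by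
  intro l _
  unfold Spec_ordenar_modelos_por_sufijo
  refine List.Perm.eq_of_pairwise ?_ (pvA_pairwise l) (pvB_pairwise l)
    ((pvA_perm l).trans (pvB_perm l).symm)
  intro a b _ _ hab hba
  rcases hab with h1 | ⟨h1, h1'⟩ <;> rcases hba with h2 | ⟨h2, h2'⟩ <;>
    first
    | exact absurd h1 (by omega)
    | exact absurd h2 (by omega)
    | exact le_antisymm h1' h2'
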